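-- pv_equiv track=rewrite | github.com/JFrunk/bridge-bidding-app | backend/engine/v2/features/enhanced_extractor.py | _get_my_bids
-- ===== SOURCE A (Python) =====
-- from typing import Dict, Any, Optional, List
--
-- def _get_my_bids(auction_history: List[str], my_position: str, dealer: str = 'North') -> List[str]:
--     """
--     Extract my bids from the auction history.
--
--     Args:
--         auction_history: List of bids in order
--         my_position: My position (North, East, South, West)
--         dealer: Dealer position (determines bid indexing)
--
--     Returns:
--         List of my bids in order
--     """
--     positions = ['North', 'East', 'South', 'West']
--     my_idx = positions.index(my_position) if my_position in positions else 0
--     dealer_idx = positions.index(dealer) if dealer in positions else 0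
--
--     my_bids = []
--     for i, bid in enumerate(auction_history):
--         # Position of bid i = (dealer_idx + i) % 4
--         bid_position_idx = (dealer_idx + i) % 4
--         if bid_position_idx == my_idx:
--             my_bids.append(bid)
--
--     return my_bids
-- ===== SOURCE B (Python) =====
-- def _get_my_bids(auction_history, my_position, dealer='North'):
--     """Closed-form start offset, then walk indices offset, offset+4, ... directly."""
--     positions = ['North', 'East', 'South', 'West']
--     my_idx = positions.index(my_position) if my_position in positions else 0
--     dealer_idx = positions.index(dealer) if dealer in positions else 0
--     out = []
--     i = (my_idx - dealer_idx) % 4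
--     while i < len(auction_history):
--         out.append(auction_history[i])
--         i += 4
--     return out
-- ===== Notes on version B (the rewrite author's own statement) =====
-- stated objective: simpler
-- what changed: A scans every element of the auction and tests a per-element modulo; B computes the single starting offset (my_idx - dealer_idx) % 4 in closed form and then walks only the indices offset, offset+4, ..., never testing positions.
import Mathlib
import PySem

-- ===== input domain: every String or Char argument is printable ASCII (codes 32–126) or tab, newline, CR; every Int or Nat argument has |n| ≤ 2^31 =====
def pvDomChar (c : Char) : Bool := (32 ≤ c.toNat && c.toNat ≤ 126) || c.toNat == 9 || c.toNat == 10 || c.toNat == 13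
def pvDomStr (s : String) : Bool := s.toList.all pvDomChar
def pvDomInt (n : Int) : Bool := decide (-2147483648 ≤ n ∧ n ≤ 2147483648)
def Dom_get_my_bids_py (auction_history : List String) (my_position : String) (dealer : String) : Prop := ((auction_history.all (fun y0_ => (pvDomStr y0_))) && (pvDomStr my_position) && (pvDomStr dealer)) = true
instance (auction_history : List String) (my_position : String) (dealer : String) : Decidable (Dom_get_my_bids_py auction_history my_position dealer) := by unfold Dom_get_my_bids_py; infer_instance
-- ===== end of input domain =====

-- B replaces A's scan-with-per-element-modulo by a closed-form start offset plus a stride-4 walk (objective: simpler).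

-- ===== PORT A =====
-- 'positions.index(s) if s in positions else 0' (index is guarded by membership, so getD is never the fallback)
def pvIdxOr0 (positions : List String) (s : String) : Int :=
  if s ∈ positions then ((PySem.List.index? positions s).getD 0 : Nat) else 0

def get_my_bids_py (auction_history : List String) (my_position : String) (dealer : String) : List String :=
  let positions : List String := ["North", "East", "South", "West"]
  let my_idx : Int := pvIdxOr0 positions my_position
  let dealer_idx : Int := pvIdxOr0 positions dealer
  (PySem.List.enumerate auction_history 0).foldl
    (fun my_bids p => if PySem.Int.mod (dealer_idx + p.1) 4 == my_idx then my_bids ++ [p.2] else my_bids) []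

-- ===== PORT B =====
-- the 'while i < len: out.append(l[i]); i += 4' loop; i = (my_idx - dealer_idx) % 4 ≥ 0, so the
-- index is carried as a Nat (.toNat of the nonnegative Python int is exact) and l[i] is in range
def pvWalk4 (l : List String) (i : Nat) : List String :=
  if h : i < l.length then l[i] :: pvWalk4 l (i + 4) else []
termination_by l.length - i

def get_my_bids_py_alt (auction_history : List String) (my_position : String) (dealer : String) : List String :=
  let positions : List String := ["North", "East", "South", "West"]
  let my_idx : Int := pvIdxOr0 positions my_position
  let dealer_idx : Int := pvIdxOr0 positions dealer
  pvWalk4 auction_history (PySem.Int.mod (my_idx - dealer_idx) 4).toNat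

-- ===== PRECONDITION & SPEC =====
def Spec_get_my_bids_py (auction_history : List String) (my_position : String) (dealer : String) (out : List String) : Prop := out = get_my_bids_py_alt auction_history my_position dealer
instance (auction_history : List String) (my_position : String) (dealer : String) (out : List String) : Decidable (Spec_get_my_bids_py auction_history my_position dealer out) := by unfold Spec_get_my_bids_py; infer_instance

-- ===== CLAIM (what is proved, stated in full; the proofs are below) =====
def Claim_equal_get_my_bids_py : Prop := ∀ (auction_history : List String) (my_position : String) (dealer : String), Dom_get_my_bids_py auction_history my_position dealer → Spec_get_my_bids_py auction_history my_position dealer (get_my_bids_py auction_history my_position dealer)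

-- ===== LEMMAS AND PROOFS =====

-- proof-only view of B's walk: stride-4 over the dropped list
def pvStride4 : List String → List String
  | [] => []
  | x :: xs => x :: pvStride4 (xs.drop 3)
termination_by l => l.length
decreasing_by simp

theorem pvStride4_nil : pvStride4 [] = [] := by simp [pvStride4]

theorem pvStride4_cons (x : String) (xs : List String) :
    pvStride4 (x :: xs) = x :: pvStride4 (xs.drop 3) := by rw [pvStride4]

theorem pvWalk4_eq_stride (l : List String) : ∀ k : Nat, pvWalk4 l k = pvStride4 (l.drop k) := by
  intro k
  induction hn : l.length - k using Nat.strong_induction_on generalizing k with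
  | _ n ih =>
      rw [pvWalk4]
      by_cases h : k < l.length
      · have hdrop : l.drop k = l[k] :: l.drop (k + 1) := List.drop_eq_getElem_cons h
        rw [dif_pos h, hdrop, pvStride4, List.drop_drop]
        rw [ih (l.length - (k + 4)) (by omega) (k + 4) rfl]
      · rw [dif_neg h, List.drop_of_length_le (by omega), pvStride4_nil]

-- the guarded index is one of 0,1,2,3
theorem pvIdxOr0_lt (positions : List String) (s : String) (h : positions.length ≤ 4) :
    ∃ k : Nat, k < 4 ∧ pvIdxOr0 positions s = (k : Int) := by
  unfold pvIdxOr0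
  split
  · rename_i hm
    rcases hk : PySem.List.index? positions s with _ | k
    · simp at hk; exact absurd hm hk
    · obtain ⟨hlt, _, _⟩ := PySem.List.getElem_of_index?_eq_some hk
      exact ⟨k, by omega, by simp⟩
  · exact ⟨0, by omega, rfl⟩

theorem enumerate_shift {α : Type} (l : List α) (s : Int) :
    PySem.List.enumerate l (s + 1) = (PySem.List.enumerate l s).map (fun p => (p.1 + 1, p.2)) := by
  induction l generalizing s with
  | nil => simp [PySem.List.enumerate_nil]
  | cons x xs ih =>
      rw [PySem.List.enumerate_cons, PySem.List.enumerate_cons]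
      simp [ih (s + 1)]

-- A's filtered scan, as a function of the phase d
def pvF (d m : Nat) (l : List String) : List String :=
  ((PySem.List.enumerate l 0).filter
    (fun p => PySem.Int.mod ((d : Int) + p.1) 4 == (m : Int))).map (·.2)

theorem pvF_cons (d m : Nat) (x : String) (xs : List String) :
    pvF d m (x :: xs) =
      (if d % 4 = m then [x] else []) ++ pvF (d + 1) m xs := by
  unfold pvF
  rw [PySem.List.enumerate_cons, show (0 : Int) + 1 = 0 + 1 from rfl, enumerate_shift]
  rw [List.filter_cons, List.filter_map]
  have harg : ∀ p : Int × String, (d : Int) + (p.1 + 1) = ((d + 1 : Nat) : Int) + p.1 := by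
    intro p; push_cast; ring
  by_cases h : d % 4 = m
  · have hc : ((d : Int) % 4 = (m : Int)) := by omega
    simp [h, hc, harg, Function.comp_def]
  · have hc : ¬ ((d : Int) % 4 = (m : Int)) := by omega
    have hc2 : ¬ (((d % 4 : Nat) : Int) = (m : Int)) := by exact_mod_cast h
    simp [h, hc, harg, Function.comp_def]

-- core: the scan equals the stride-4 walk starting at the closed-form offset
theorem pvF_eq_stride (m : Nat) (hm : m < 4) (l : List String) :
    ∀ d : Nat, pvF d m l = pvStride4 (l.drop ((m + 4 - d % 4) % 4)) := by
  induction l with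
  | nil => intro d; simp [pvF, PySem.List.enumerate_nil, pvStride4_nil]
  | cons x xs ih =>
      intro d
      rw [pvF_cons, ih (d + 1)]
      by_cases h : d % 4 = m
      · have h0 : (m + 4 - d % 4) % 4 = 0 := by omega
        have h1 : (m + 4 - (d + 1) % 4) % 4 = 3 := by omega
        simp [h, h1, pvStride4_cons]
      · have hoff : 1 ≤ (m + 4 - d % 4) % 4 := by omega
        have h1 : (m + 4 - (d + 1) % 4) % 4 = (m + 4 - d % 4) % 4 - 1 := by omega
        have hd : (x :: xs).drop ((m + 4 - d % 4) % 4) = xs.drop ((m + 4 - d % 4) % 4 - 1) := by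
          rcases Nat.exists_eq_add_of_le hoff with ⟨k, hk⟩
          rw [hk]; simp [Nat.add_comm]
        simp [h, h1, hd]

theorem main_eq (l : List String) (d m : Nat) (hd : d < 4) (hm : m < 4) :
    (PySem.List.enumerate l 0).foldl
      (fun my_bids p => if PySem.Int.mod ((d : Int) + p.1) 4 == (m : Int) then my_bids ++ [p.2] else my_bids) [] =
    pvWalk4 l (PySem.Int.mod ((m : Int) - (d : Int)) 4).toNat := by
  have hfold := PySem.List.foldl_append_if
    (fun p : Int × String => PySem.Int.mod ((d : Int) + p.1) 4 == (m : Int)) (·.2)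
    (PySem.List.enumerate l 0) []
  rw [hfold]
  have hmodv : PySem.Int.mod ((m : Int) - (d : Int)) 4 = (((m + 4 - d) % 4 : Nat) : Int) := by
    rw [PySem.Int.mod_eq_emod_of_pos (by norm_num)]; omega
  rw [hmodv, Int.toNat_natCast, pvWalk4_eq_stride]
  have := pvF_eq_stride m hm l d
  have hoff : (m + 4 - d % 4) % 4 = (m + 4 - d) % 4 := by omega
  rw [hoff] at this
  simpa [pvF] using this

-- ===== VERDICT (by name: the statement is the Claim_ definition above) =====
theorem get_my_bids_py_spec : Claim_equal_get_my_bids_py := by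
  intro l mp dl _
  unfold Spec_get_my_bids_py get_my_bids_py get_my_bids_py_alt
  obtain ⟨m, hm, hme⟩ := pvIdxOr0_lt ["North", "East", "South", "West"] mp (by simp)
  obtain ⟨d, hd, hde⟩ := pvIdxOr0_lt ["North", "East", "South", "West"] dl (by simp)
  simp only [hme, hde]
  exact main_eq l d m hd hm
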